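-- pv_equiv track=rewrite | github.com/PanDAWMS/panda-client | pandaclient/PsubUtils.py | check_invalid_char
-- ===== SOURCE A (Python) =====
-- def check_invalid_char(s, is_file=False):
--     ng_list = [
--         "%",
--         "|",
--         ";",
--         ">",
--         "<",
--         "?",
--         "'",
--         '"',
--         "(",
--         ")",
--         "$",
--         "@",
--         ":",
--         "=",
--         "&",
--         "^",
--         "#",
--         "\\",
--         "@",
--         "[",
--         "]",
--         "{",
--         "}",
--         "`",
--     ]
--
--     # wildcard is allowed in filename
--     if not is_file:
--         ng_list += ["*"]
--
--     for tmp_char in ng_list: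
--         if tmp_char in s:
--             return tmp_char
--     return None
-- ===== SOURCE B (Python) =====
-- def check_invalid_char(s, is_file=False):
--     # Priority table: each blacklisted char -> its position in the original
--     # list (first position for the duplicated '@'); '*' has lowest priority
--     # and is only blacklisted when not is_file.
--     ng_chars = "%|;><?'\"()$@:=&^#\\@[]{}`"
--     prio = {}
--     for i, c in enumerate(ng_chars):
--         if c not in prio:
--             prio[c] = i
--     if not is_file:
--         prio["*"] = len(ng_chars)
--     best = None
--     for c in s:
--         p = prio.get(c)
--         if p is not None and (best is None or p < best[1]):
--             best = (c, p)
--     return best[0] if best is not None else None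
-- ===== Notes on version B (the rewrite author's own statement) =====
-- stated objective: alternative
-- what changed: Replaces the 25 repeated substring scans of s with a char->priority dict built once and a single pass over s keeping the minimum-priority hit.
import Mathlib
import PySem

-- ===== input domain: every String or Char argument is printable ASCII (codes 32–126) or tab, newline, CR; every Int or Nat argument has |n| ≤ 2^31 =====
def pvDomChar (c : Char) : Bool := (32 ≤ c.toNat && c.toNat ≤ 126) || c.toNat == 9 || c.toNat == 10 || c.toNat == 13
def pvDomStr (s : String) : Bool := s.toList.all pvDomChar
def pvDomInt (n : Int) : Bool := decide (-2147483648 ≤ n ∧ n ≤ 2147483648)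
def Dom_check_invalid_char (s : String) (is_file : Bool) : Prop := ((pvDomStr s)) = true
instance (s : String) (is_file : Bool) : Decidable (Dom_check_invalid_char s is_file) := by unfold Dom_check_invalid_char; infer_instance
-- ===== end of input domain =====

-- B replaces A's 25 repeated substring scans of s by a char→priority dict built
-- once and a single pass over s keeping the minimum-priority hit (objective: alternative).

-- ===== PORT A =====
-- ng_list, with the conditional '+= ["*"]'
def ngStrings (is_file : Bool) : List String :=
  let base : List String :=
    ["%", "|", ";", ">", "<", "?", "'", "\"", "(", ")", "$", "@", ":", "=",
     "&", "^", "#", "\\", "@", "[", "]", "{", "}", "`"]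
  if is_file then base else base ++ ["*"]

-- the 'for tmp_char in ng_list: if tmp_char in s: return tmp_char' loop is a first-match scan
def check_invalid_char (s : String) (is_file : Bool) : Option String :=
  (ngStrings is_file).find? (fun tmp_char => PySem.Str.isIn tmp_char s)

-- ===== PORT B =====
-- Source B's ng_chars string, as its character list
def ngChars : List Char :=
  ['%', '|', ';', '>', '<', '?', '\'', '"', '(', ')', '$', '@', ':', '=',
   '&', '^', '#', '\\', '@', '[', ']', '{', '}', '`']

-- Source B's prio dict: first index for duplicates; '*' appended with lowest priority iff not is_file
def prioDict (is_file : Bool) : PySem.Dict Char Int :=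
  let d := (PySem.List.enumerate ngChars).foldl
    (fun d pc => if d.contains pc.2 then d else d.insert pc.2 pc.1) PySem.Dict.empty
  if is_file then d else d.insert '*' (ngChars.length : Int)

-- the body of Source B's 'for c in s' loop
def pvStep (d : PySem.Dict Char Int) (best : Option (Char × Int)) (c : Char) :
    Option (Char × Int) :=
  match d.get? c with
  | none => best
  | some p =>
    match best with
    | none => some (c, p)
    | some b => if p < b.2 then some (c, p) else best

def check_invalid_char_alt (s : String) (is_file : Bool) : Option String :=
  let d := prioDict is_file
  let best := s.toList.foldl (pvStep d) none
  best.map (fun b => String.ofList [b.1])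

-- ===== PRECONDITION & SPEC =====
def Spec_check_invalid_char (s : String) (is_file : Bool) (out : Option String) : Prop := out = check_invalid_char_alt s is_file
instance (s : String) (is_file : Bool) (out : Option String) : Decidable (Spec_check_invalid_char s is_file out) := by unfold Spec_check_invalid_char; infer_instance

-- ===== CLAIM (what is proved, stated in full; the proofs are below) =====
def Claim_equal_check_invalid_char : Prop := ∀ (s : String) (is_file : Bool), Dom_check_invalid_char s is_file → Spec_check_invalid_char s is_file (check_invalid_char s is_file)

-- ===== LEMMAS AND PROOFS =====

-- the blacklist on the character level (A's list of one-char strings, as chars)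
def pvL (is_file : Bool) : List Char := if is_file then ngChars else ngChars ++ ['*']

theorem pv_ngStrings_eq (is_file : Bool) :
    ngStrings is_file = (pvL is_file).map (fun c => String.ofList [c]) := by
  cases is_file <;> decide

theorem pv_isIn_single (c : Char) (s : String) :
    PySem.Str.isIn (String.ofList [c]) s = decide (c ∈ s.toList) := by
  by_cases h : c ∈ s.toList
  · simp only [h, decide_true]
    exact (PySem.Str.isIn_iff_infix _ _).mpr (by simpa using (List.singleton_infix_iff c s.toList).mpr h)
  · simp only [h, decide_false]
    by_contra hne
    have : PySem.Str.isIn (String.ofList [c]) s = true := by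
      cases hb : PySem.Str.isIn (String.ofList [c]) s
      · exact absurd hb hne
      · rfl
    have := (PySem.Str.isIn_iff_infix _ _).mp this
    simp [List.singleton_infix_iff] at this
    exact h this

-- get? on a literal dict whose key list misses c
theorem pv_get?_mk_none {κ ν : Type} [BEq κ] [LawfulBEq κ] (prs : List (κ × ν)) (c : κ)
    (h : c ∉ prs.map Prod.fst) : (PySem.Dict.mk prs).get? c = none := by
  induction prs with
  | nil => rfl
  | cons pr tl ih =>
    rcases pr with ⟨k, v⟩
    have h1 : ¬ (k = c) := fun he => h (by simp [he])
    have h2 : c ∉ tl.map Prod.fst := fun hm => h (by simp [hm])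
    rw [PySem.Dict.get?_mk_cons, if_neg (by simp [h1])]
    exact ih h2

-- the prio dict, evaluated to its literal form
def pvItemsBase : List (Char × Int) :=
  [('%',0),('|',1),(';',2),('>',3),('<',4),('?',5),('\'',6),('"',7),('(',8),(')',9),
   ('$',10),('@',11),(':',12),('=',13),('&',14),('^',15),('#',16),('\\',17),('[',19),
   (']',20),('{',21),('}',22),('`',23)]

set_option maxRecDepth 4000 in
theorem pv_prio_true : prioDict true = PySem.Dict.mk pvItemsBase := by rfl

set_option maxRecDepth 4000 in
theorem pv_prio_false : prioDict false = PySem.Dict.mk (pvItemsBase ++ [('*',24)]) := by rfl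

-- the prio dict computes: first index in pvL, none off the blacklist
set_option maxRecDepth 2048 in
theorem pv_get?_prio (is_file : Bool) (c : Char) :
    (prioDict is_file).get? c =
      if c ∈ pvL is_file then some (((pvL is_file).idxOf c : Nat) : Int) else none := by
  by_cases h : c ∈ pvL is_file
  · rw [if_pos h]
    cases is_file
    · rw [pv_prio_false]
      simp only [pvL, Bool.false_eq_true, if_false] at h
      fin_cases h <;> decide
    · rw [pv_prio_true]
      simp only [pvL, if_true] at h
      fin_cases h <;> decide
  · rw [if_neg h]
    have hkeys : ∀ x ∈ ((prioDict is_file).items.map Prod.fst), x ∈ pvL is_file := by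
      cases is_file
      · rw [pv_prio_false]
        intro x hx
        simp only [pvItemsBase, List.cons_append, List.nil_append, List.map_cons,
          List.map_nil] at hx
        fin_cases hx <;> decide
      · rw [pv_prio_true]
        intro x hx
        simp only [pvItemsBase, List.map_cons, List.map_nil] at hx
        fin_cases hx <;> decide
    have hc : c ∉ (prioDict is_file).items.map Prod.fst := fun hk => h (hkeys c hk)
    have heq : prioDict is_file = PySem.Dict.mk (prioDict is_file).items := rfl
    rw [heq]
    exact pv_get?_mk_none _ _ hc

-- first-match scans pick the minimum-index match
theorem pv_find?_idxOf_le {α : Type} [BEq α] [LawfulBEq α] (p : α → Bool) :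
    ∀ (L : List α) (c : α), L.find? p = some c →
      ∀ c' ∈ L, p c' = true → L.idxOf c ≤ L.idxOf c' := by
  intro L
  induction L with
  | nil => intro c h; simp at h
  | cons x t ih =>
    intro c h c' hc' hp
    rw [List.mem_cons] at hc'
    rcases hx : p x with _ | _
    · rw [List.find?_cons_of_neg (by simp [hx])] at h
      have hcx : c ≠ x := fun he => by
        have := List.find?_some h; rw [he] at this; simp [hx] at this
      rcases hc' with hc' | hc'
      · exact absurd hp (by simp [hc', hx])
      · have hc'x : c' ≠ x := fun he => by rw [he] at hp; simp [hx] at hp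
        rw [List.idxOf_cons_ne _ (by simpa using (Ne.symm hcx)),
            List.idxOf_cons_ne _ (by simpa using (Ne.symm hc'x))]
        exact Nat.succ_le_succ (ih c h c' hc' hp)
    · rw [List.find?_cons_of_pos (by simp [hx])] at h
      cases h
      simp [List.idxOf_cons_self]

-- B's running-minimum loop: characterisation of the final accumulator
theorem pv_fold_none_iff (d : PySem.Dict Char Int) :
    ∀ (l : List Char) (acc : Option (Char × Int)),
      l.foldl (pvStep d) acc = none ↔ acc = none ∧ ∀ c ∈ l, d.get? c = none := by
  intro l
  induction l with
  | nil => intro acc; simp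
  | cons x t ih =>
    intro acc
    rw [List.foldl_cons, ih]
    constructor
    · rintro ⟨h1, h2⟩
      rcases hx : d.get? x with _ | q
      · simp only [pvStep, hx] at h1
        refine ⟨h1, ?_⟩
        intro cc hcc
        rw [List.mem_cons] at hcc
        rcases hcc with hcc | hcc
        · exact hcc ▸ hx
        · exact h2 cc hcc
      · simp only [pvStep, hx] at h1
        rcases acc with _ | b <;> simp at h1
        split at h1 <;> simp_all
    · rintro ⟨h1, h2⟩
      subst h1
      have hx := h2 x (by simp)
      refine ⟨by simp only [pvStep, hx], fun cc hcc => h2 cc (by simp [hcc])⟩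

theorem pv_fold_some (d : PySem.Dict Char Int) :
    ∀ (l : List Char) (acc : Option (Char × Int)) (c : Char) (p : Int),
      l.foldl (pvStep d) acc = some (c, p) →
        ((acc = some (c, p)) ∨ (c ∈ l ∧ d.get? c = some p))
        ∧ (∀ b, acc = some b → p ≤ b.2)
        ∧ (∀ c' ∈ l, ∀ p', d.get? c' = some p' → p ≤ p') := by
  intro l
  induction l with
  | nil =>
    intro acc c p h
    simp only [List.foldl_nil] at h
    exact ⟨Or.inl h, fun b hb => by rw [h] at hb; cases hb; rfl, by simp⟩
  | cons x t ih =>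
    intro acc c p h
    rw [List.foldl_cons] at h
    obtain ⟨h1, h2, h3⟩ := ih (pvStep d acc x) c p h
    rcases hx : d.get? x with _ | q
    · simp only [pvStep, hx] at h1 h2
      refine ⟨?_, h2, ?_⟩
      · rcases h1 with h1 | h1
        · exact Or.inl h1
        · exact Or.inr ⟨by simp [h1.1], h1.2⟩
      · intro c' hc' p' hp'
        rw [List.mem_cons] at hc'
        rcases hc' with hc' | hc'
        · rw [hc'] at hp'; rw [hx] at hp'; cases hp'
        · exact h3 c' hc' p' hp'
    · rcases acc with _ | b0
      · have hk : pvStep d none x = some (x, q) := by simp only [pvStep, hx]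
        rw [hk] at h1 h2
        have hpq : p ≤ q := by simpa using h2 (x, q) rfl
        refine ⟨?_, by rintro b ⟨⟩, ?_⟩
        · rcases h1 with h1 | h1
          · simp only [Option.some.injEq, Prod.mk.injEq] at h1
            exact Or.inr ⟨by simp [h1.1], by rw [← h1.1, hx, h1.2]⟩
          · exact Or.inr ⟨by simp [h1.1], h1.2⟩
        · intro c' hc' p' hp'
          rw [List.mem_cons] at hc'
          rcases hc' with hc' | hc'
          · rw [hc', hx] at hp'; cases hp'; exact hpq
          · exact h3 c' hc' p' hp'
      · by_cases hq : q < b0.2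
        · have hk : pvStep d (some b0) x = some (x, q) := by
            simp only [pvStep, hx]; rw [if_pos hq]
          rw [hk] at h1 h2
          have hpq : p ≤ q := by simpa using h2 (x, q) rfl
          refine ⟨?_, ?_, ?_⟩
          · rcases h1 with h1 | h1
            · simp only [Option.some.injEq, Prod.mk.injEq] at h1
              exact Or.inr ⟨by simp [h1.1], by rw [← h1.1, hx, h1.2]⟩
            · exact Or.inr ⟨by simp [h1.1], h1.2⟩
          · intro b hb
            have hb' : b = b0 := by injection hb with hb2; exact hb2.symm
            rw [hb']
            have hqb : q < b0.2 := hq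
            omega
          · intro c' hc' p' hp'
            rw [List.mem_cons] at hc'
            rcases hc' with hc' | hc'
            · rw [hc', hx] at hp'; cases hp'; exact hpq
            · exact h3 c' hc' p' hp'
        · have hk : pvStep d (some b0) x = some b0 := by
            simp only [pvStep, hx]; rw [if_neg hq]
          rw [hk] at h1 h2
          have hpb : p ≤ b0.2 := h2 b0 rfl
          refine ⟨?_, ?_, ?_⟩
          · rcases h1 with h1 | h1
            · exact Or.inl h1
            · exact Or.inr ⟨by simp [h1.1], h1.2⟩
          · intro b hb
            have hb' : b = b0 := by injection hb with hb2; exact hb2.symm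
            rw [hb']
            exact hpb
          · intro c' hc' p' hp'
            rw [List.mem_cons] at hc'
            rcases hc' with hc' | hc'
            · rw [hc', hx] at hp'; cases hp'; omega
            · exact h3 c' hc' p' hp'

-- the core equivalence on the character level
theorem pv_main (is_file : Bool) (l : List Char) :
    Option.map Prod.fst (l.foldl (pvStep (prioDict is_file)) none) =
      (pvL is_file).find? (fun c => decide (c ∈ l)) := by
  set d := prioDict is_file with hd
  set L := pvL is_file with hL
  rcases hR : l.foldl (pvStep d) none with _ | b
  · have h := ((pv_fold_none_iff d l none).mp hR).2
    simp only [Option.map_none]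
    symm
    rw [List.find?_eq_none]
    intro x hx
    simp only [decide_eq_true_eq]
    intro hxl
    have := h x hxl
    rw [hd, pv_get?_prio, ← hL, if_pos hx] at this
    cases this
  · rcases b with ⟨c, p⟩
    obtain ⟨h1, _, h3⟩ := pv_fold_some d l none c p hR
    rcases h1 with h1 | ⟨hcl, hcp⟩
    · cases h1
    have hcL : c ∈ L := by
      by_contra hc
      rw [hd, pv_get?_prio, ← hL, if_neg hc] at hcp
      cases hcp
    have hp : p = ((L.idxOf c : Nat) : Int) := by
      rw [hd, pv_get?_prio, ← hL, if_pos hcL] at hcp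
      cases hcp; rfl
    rcases hF : L.find? (fun c => decide (c ∈ l)) with _ | c'
    · rw [List.find?_eq_none] at hF
      exact absurd (by simpa using hcl) (hF c hcL)
    · have hc'L : c' ∈ L := List.mem_of_find?_eq_some hF
      have hc'l : c' ∈ l := by simpa using List.find?_some hF
      have hidx : L.idxOf c' ≤ L.idxOf c :=
        pv_find?_idxOf_le _ L c' hF c hcL (by simpa using hcl)
      have hc'p : d.get? c' = some ((L.idxOf c' : Nat) : Int) := by
        rw [hd, pv_get?_prio, ← hL, if_pos hc'L]
      have hle : p ≤ ((L.idxOf c' : Nat) : Int) := h3 c' hc'l _ hc'p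
      have hix : L.idxOf c = L.idxOf c' := by
        rw [hp] at hle
        omega
      have hcc : c = c' := (List.idxOf_inj hcL).mp hix
      simp [Option.map, hcc]

-- ===== VERDICT (by name: the statement is the Claim_ definition above) =====
theorem check_invalid_char_spec : Claim_equal_check_invalid_char := by
  intro s is_file _
  unfold Spec_check_invalid_char check_invalid_char check_invalid_char_alt
  rw [pv_ngStrings_eq, List.find?_map]
  have hpred : ((fun tmp_char => PySem.Str.isIn tmp_char s) ∘ (fun c => String.ofList [c]))
      = fun c => decide (c ∈ s.toList) := by
    funext c
    exact pv_isIn_single c s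
  rw [hpred, ← pv_main is_file s.toList]
  simp only [Option.map_map]
  rfl
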